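-- pv_equiv track=rewrite | github.com/Suraj-creation/Jarurat-Care | backend/main.py | get_quick_replies
-- ===== SOURCE A (Python) =====
-- from typing import List, Optional, Any
--
-- def get_quick_replies(message: str) -> List[str]:
--     """Generate contextual quick replies"""
--     message_lower = message.lower()
--
--     if any(word in message_lower for word in ['hello', 'hi', 'hey', 'start']):
--         return ['Cancer Support', 'Become a Volunteer', 'Locate Hospitals', 'Donate']
--     elif any(word in message_lower for word in ['cancer', 'diagnosis', 'treatment']):
--         return ['Patient Form', 'Find a Mentor', 'Locate Hospitals']
--     elif any(word in message_lower for word in ['volunteer', 'help others', 'join']):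
--         return ['Register as Volunteer', 'Learn More', 'Contact Us']
--     elif any(word in message_lower for word in ['emergency', 'urgent', 'critical']):
--         return ['Call 108', 'Urgent Support', 'Locate Hospitals']
--     elif any(word in message_lower for word in ['donate', 'contribute', 'fund']):
--         return ['Donate Now', 'Other Ways to Help', 'Our Impact']
--     else:
--         return ['Cancer Support', 'Volunteer', 'Donate', 'Contact Us']
-- ===== SOURCE B (Python) =====
-- from typing import List
--
-- # Flat keyword -> priority table; B computes ALL matching priorities (no
-- # short-circuit branch chain), takes the minimum, and indexes a reply table.
-- KEYWORD_PRIORITY = [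
--     ('hello', 0), ('hi', 0), ('hey', 0), ('start', 0),
--     ('cancer', 1), ('diagnosis', 1), ('treatment', 1),
--     ('volunteer', 2), ('help others', 2), ('join', 2),
--     ('emergency', 3), ('urgent', 3), ('critical', 3),
--     ('donate', 4), ('contribute', 4), ('fund', 4),
-- ]
--
-- REPLY_SETS = [
--     ['Cancer Support', 'Become a Volunteer', 'Locate Hospitals', 'Donate'],
--     ['Patient Form', 'Find a Mentor', 'Locate Hospitals'],
--     ['Register as Volunteer', 'Learn More', 'Contact Us'],
--     ['Call 108', 'Urgent Support', 'Locate Hospitals'],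
--     ['Donate Now', 'Other Ways to Help', 'Our Impact'],
--     ['Cancer Support', 'Volunteer', 'Donate', 'Contact Us'],
-- ]
--
-- def get_quick_replies(message: str) -> List[str]:
--     """Generate contextual quick replies (min-priority selection)"""
--     message_lower = message.lower()
--     matched = [p for w, p in KEYWORD_PRIORITY if w in message_lower]
--     return REPLY_SETS[min(matched, default=5)]
-- ===== Notes on version B (the rewrite author's own statement) =====
-- stated objective: alternative
-- what changed: Instead of an ordered if/elif chain with short-circuit first-match, B tests every keyword once, collects the priorities of all matching keywords, and selects the reply set for the minimum matched priority from an indexed reply table (default priority 5).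
import Mathlib
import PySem

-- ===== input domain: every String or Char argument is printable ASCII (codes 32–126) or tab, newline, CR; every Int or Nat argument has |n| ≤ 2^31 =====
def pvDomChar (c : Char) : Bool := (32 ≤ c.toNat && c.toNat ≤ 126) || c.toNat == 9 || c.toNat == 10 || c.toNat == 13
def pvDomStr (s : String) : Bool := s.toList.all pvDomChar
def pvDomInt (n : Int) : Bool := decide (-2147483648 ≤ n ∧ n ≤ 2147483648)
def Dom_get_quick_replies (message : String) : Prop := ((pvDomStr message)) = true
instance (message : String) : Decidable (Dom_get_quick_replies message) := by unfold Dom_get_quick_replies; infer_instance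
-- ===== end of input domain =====

-- B replaces the ordered if/elif chain by testing every keyword, taking the MINIMUM matched priority and indexing a reply table (alternative decomposition; same behaviour).

-- ===== PORT A =====
def get_quick_replies (message : String) : List String :=
  let message_lower := PySem.Str.lower message
  if (["hello", "hi", "hey", "start"].any fun word => PySem.Str.isIn word message_lower) then
    ["Cancer Support", "Become a Volunteer", "Locate Hospitals", "Donate"]
  else if (["cancer", "diagnosis", "treatment"].any fun word => PySem.Str.isIn word message_lower) then
    ["Patient Form", "Find a Mentor", "Locate Hospitals"]
  else if (["volunteer", "help others", "join"].any fun word => PySem.Str.isIn word message_lower) then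
    ["Register as Volunteer", "Learn More", "Contact Us"]
  else if (["emergency", "urgent", "critical"].any fun word => PySem.Str.isIn word message_lower) then
    ["Call 108", "Urgent Support", "Locate Hospitals"]
  else if (["donate", "contribute", "fund"].any fun word => PySem.Str.isIn word message_lower) then
    ["Donate Now", "Other Ways to Help", "Our Impact"]
  else
    ["Cancer Support", "Volunteer", "Donate", "Contact Us"]

-- ===== PORT B =====
-- flat keyword -> priority table (Source B's KEYWORD_PRIORITY)
def pvKEYWORD_PRIORITY : List (String × Int) :=
  [("hello", 0), ("hi", 0), ("hey", 0), ("start", 0),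
   ("cancer", 1), ("diagnosis", 1), ("treatment", 1),
   ("volunteer", 2), ("help others", 2), ("join", 2),
   ("emergency", 3), ("urgent", 3), ("critical", 3),
   ("donate", 4), ("contribute", 4), ("fund", 4)]

def pvREPLY_SETS : List (List String) :=
  [["Cancer Support", "Become a Volunteer", "Locate Hospitals", "Donate"],
   ["Patient Form", "Find a Mentor", "Locate Hospitals"],
   ["Register as Volunteer", "Learn More", "Contact Us"],
   ["Call 108", "Urgent Support", "Locate Hospitals"],
   ["Donate Now", "Other Ways to Help", "Our Impact"],
   ["Cancer Support", "Volunteer", "Donate", "Contact Us"]]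

-- Python's min(matched, default=5) is ported as foldl min 5 (exact for Int lists);
-- REPLY_SETS[i] as pyGet? with .getD [] (the index is always in range 0..5).
def get_quick_replies_alt (message : String) : List String :=
  let message_lower := PySem.Str.lower message
  let matched := pvKEYWORD_PRIORITY.filterMap
    (fun kw => if PySem.Str.isIn kw.1 message_lower then some kw.2 else none)
  (PySem.List.pyGet? pvREPLY_SETS (matched.foldl min 5)).getD []

-- ===== PRECONDITION & SPEC =====
def Spec_get_quick_replies (message : String) (out : List String) : Prop := out = get_quick_replies_alt message
instance (message : String) (out : List String) : Decidable (Spec_get_quick_replies message out) := by unfold Spec_get_quick_replies; infer_instance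

-- ===== CLAIM (what is proved, stated in full; the proofs are below) =====
def Claim_equal_get_quick_replies : Prop := ∀ (message : String), Dom_get_quick_replies message → Spec_get_quick_replies message (get_quick_replies message)

-- ===== LEMMAS AND PROOFS =====

-- folding min over one keyword group: either the group matches (the accumulator
-- picks up its priority) or it contributes nothing
theorem pv_min_group (ml : String) (i : Int) (ws : List String)
    (t : List (String × Int)) (a : Int) :
    (((ws.map (fun w => (w, i))) ++ t).filterMap
        (fun kw => if PySem.Str.isIn kw.1 ml then some kw.2 else none)).foldl min a
    = if ws.any (fun w => PySem.Str.isIn w ml) then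
        ((t.filterMap (fun kw => if PySem.Str.isIn kw.1 ml then some kw.2 else none)).foldl min (min a i))
      else
        ((t.filterMap (fun kw => if PySem.Str.isIn kw.1 ml then some kw.2 else none)).foldl min a) := by
  induction ws generalizing a with
  | nil => simp
  | cons w ws ih =>
    cases h : PySem.Str.isIn w ml with
    | true =>
      simp only [List.map_cons, List.cons_append, List.filterMap_cons, h,
        List.any_cons, Bool.true_or, if_true, List.foldl_cons, ih]
      split_ifs <;> simp
    | false =>
      simp only [List.map_cons, List.cons_append, List.filterMap_cons, h,
        List.any_cons, Bool.false_or, Bool.false_eq_true, if_false, ih]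

-- ===== VERDICT (by name: the statement is the Claim_ definition above) =====
theorem get_quick_replies_spec : Claim_equal_get_quick_replies := by
  intro message _
  show get_quick_replies message = get_quick_replies_alt message
  unfold get_quick_replies get_quick_replies_alt
  have hK : pvKEYWORD_PRIORITY
      = (["hello", "hi", "hey", "start"].map fun w => (w, (0 : Int)))
        ++ ((["cancer", "diagnosis", "treatment"].map fun w => (w, (1 : Int)))
        ++ ((["volunteer", "help others", "join"].map fun w => (w, (2 : Int)))
        ++ ((["emergency", "urgent", "critical"].map fun w => (w, (3 : Int)))
        ++ ((["donate", "contribute", "fund"].map fun w => (w, (4 : Int)))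
        ++ ([] : List (String × Int)))))) := by rfl
  rw [hK]
  simp only [pv_min_group]
  split_ifs <;> rfl
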